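-- pv_equiv track=rewrite | github.com/Julmust/advent-of-code-2025 | day_2/main.py | check_substr
-- ===== SOURCE A (Python) =====
-- def check_substr(stringified, num_len, i, stop) -> int:
--     for j in range(1, stop + 1):
--         substr = stringified[:j]
--
--         for x in range(j, len(stringified) + 1, j):
--             if substr != stringified[x : x + len(substr)]:
--                 break
--             if x + len(substr) == num_len:
--                 return i
--
--     return 0
-- ===== SOURCE B (Python) =====
-- def check_substr(stringified, num_len, i, stop) -> int:
--     if 0 < num_len <= len(stringified):
--         for j in range(1, stop + 1):
--             if num_len % j == 0 and 2 * j <= num_len and stringified[j:num_len] == stringified[:num_len - j]: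
--                 return i
--     return 0
-- ===== Notes on version B (the rewrite author's own statement) =====
-- stated objective: simpler
-- what changed: Replaces A's nested block-by-block tiling scan (comparing every aligned j-block of the string to the prefix) with a flat loop that tests each candidate j by divisibility plus a single shifted-slice period comparison stringified[j:num_len] == stringified[:num_len-j].
import Mathlib
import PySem

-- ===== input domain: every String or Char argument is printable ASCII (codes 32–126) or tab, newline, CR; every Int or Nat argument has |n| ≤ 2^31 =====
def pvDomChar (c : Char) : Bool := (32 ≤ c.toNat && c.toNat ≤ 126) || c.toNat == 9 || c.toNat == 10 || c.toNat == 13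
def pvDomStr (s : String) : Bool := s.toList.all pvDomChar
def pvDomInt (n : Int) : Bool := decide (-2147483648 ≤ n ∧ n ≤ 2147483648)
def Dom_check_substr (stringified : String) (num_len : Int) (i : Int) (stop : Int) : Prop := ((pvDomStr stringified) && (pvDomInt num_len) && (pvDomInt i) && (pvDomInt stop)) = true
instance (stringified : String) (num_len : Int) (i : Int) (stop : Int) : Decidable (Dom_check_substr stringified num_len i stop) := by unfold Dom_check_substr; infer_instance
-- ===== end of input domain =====

-- B replaces A's nested block-by-block tiling scan with one divisibility test plus a single
-- shifted-slice period comparison per candidate j (objective: alternative algorithm, same cost class).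

-- ===== PORT A =====
-- inner loop 'for x in range(j, len(stringified)+1, j)': none = break / loop exhausted, some i = 'return i'
def pvInnerA (cs : List Char) (substr : List Char) (num_len : Int) (i : Int) : List Int → Option Int
  | [] => none
  | x :: xs =>
    if substr ≠ PySem.List.slice cs (some x) (some (x + (substr.length : Int))) then none
    else if x + (substr.length : Int) = num_len then some i
    else pvInnerA cs substr num_len i xs

-- outer loop 'for j in range(1, stop+1)'
def pvOuterA (cs : List Char) (num_len : Int) (i : Int) : List Int → Int
  | [] => 0
  | j :: js =>
    match pvInnerA cs (PySem.List.slice cs none (some j)) num_len i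
        (PySem.List.pyRange j ((cs.length : Int) + 1) j) with
    | some r => r
    | none => pvOuterA cs num_len i js

def check_substr (stringified : String) (num_len : Int) (i : Int) (stop : Int) : Int :=
  pvOuterA stringified.toList num_len i (PySem.List.pyRange 1 (stop + 1) 1)

-- ===== PORT B =====
-- loop 'for j in range(1, stop+1): if num_len % j == 0 and 2*j <= num_len and s[j:num_len] == s[:num_len-j]: return i'
def pvLoopB (cs : List Char) (num_len : Int) (i : Int) : List Int → Int
  | [] => 0
  | j :: js =>
    if PySem.Int.mod num_len j = 0 ∧ 2 * j ≤ num_len ∧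
        PySem.List.slice cs (some j) (some num_len)
          = PySem.List.slice cs none (some (num_len - j)) then i
    else pvLoopB cs num_len i js

def check_substr_alt (stringified : String) (num_len : Int) (i : Int) (stop : Int) : Int :=
  if 0 < num_len ∧ num_len ≤ (stringified.toList.length : Int) then
    pvLoopB stringified.toList num_len i (PySem.List.pyRange 1 (stop + 1) 1)
  else 0

-- ===== PRECONDITION & SPEC =====
def Spec_check_substr (stringified : String) (num_len : Int) (i : Int) (stop : Int) (out : Int) : Prop := out = check_substr_alt stringified num_len i stop
instance (stringified : String) (num_len : Int) (i : Int) (stop : Int) (out : Int) : Decidable (Spec_check_substr stringified num_len i stop out) := by unfold Spec_check_substr; infer_instance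

-- ===== CLAIM (what is proved, stated in full; the proofs are below) =====
def Claim_equal_check_substr : Prop := ∀ (stringified : String) (num_len : Int) (i : Int) (stop : Int), Dom_check_substr stringified num_len i stop → Spec_check_substr stringified num_len i stop (check_substr stringified num_len i stop)

-- ===== LEMMAS AND PROOFS =====

lemma pvInnerA_none_or (cs substr : List Char) (n i : Int) (xs : List Int) :
    pvInnerA cs substr n i xs = none ∨ pvInnerA cs substr n i xs = some i := by
  induction xs with
  | nil => left; rfl
  | cons x xs ih =>
    simp only [pvInnerA]
    split
    · left; rfl
    · split
      · right; rfl
      · exact ih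

-- A's inner loop over the multiples (t0+k)*jn, k < T, returns `some i` exactly when some
-- multiple M in range has all blocks t0..M equal to substr and (M+1)*jn = num_len.
lemma pvInnerA_range_spec (cs substr : List Char) (n i : Int) (jn : Nat)
    (hlen : substr.length = jn) :
    ∀ (T t0 : Nat),
      (pvInnerA cs substr n i ((List.range T).map (fun k => (((t0 + k) * jn : Nat) : Int))) = some i
        ↔ ∃ M : Nat, t0 ≤ M ∧ M < t0 + T ∧
            (∀ m : Nat, t0 ≤ m → m ≤ M → substr = (cs.drop (m * jn)).take jn) ∧
            n = ((M + 1) * jn : Nat)) := by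
  intro T
  induction T with
  | zero =>
    intro t0
    simp only [List.range_zero, List.map_nil, pvInnerA]
    constructor
    · intro h; simp at h
    · rintro ⟨M, h1, h2, -, -⟩; omega
  | succ T ih =>
    intro t0
    have hlist : (List.range (T + 1)).map (fun k => (((t0 + k) * jn : Nat) : Int))
        = (((t0 * jn : Nat) : Int)) :: (List.range T).map (fun k => (((t0 + 1 + k) * jn : Nat) : Int)) := by
      rw [List.range_succ_eq_map, List.map_cons, List.map_map]
      refine congrArg₂ List.cons (by norm_num) (List.map_congr_left ?_)
      intro a _
      simp only [Function.comp_apply, Nat.succ_eq_add_one]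
      congr 1
      ring
    rw [hlist]
    simp only [pvInnerA, hlen]
    rw [PySem.List.slice_natCast_add]
    by_cases hpass : substr = (cs.drop (t0 * jn)).take jn
    · rw [if_neg (by simp [hpass])]
      by_cases hret : ((t0 * jn : Nat) : Int) + (jn : Int) = n
      · rw [if_pos hret]
        constructor
        · intro _
          refine ⟨t0, le_rfl, by omega, ?_, ?_⟩
          · intro m h1 h2
            have hm : m = t0 := le_antisymm h2 h1
            rw [hm]; exact hpass
          · rw [Nat.succ_mul, Nat.cast_add]; exact hret.symm
        · intro _; rfl
      · rw [if_neg hret, ih (t0 + 1)]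
        constructor
        · rintro ⟨M, h1, h2, hall, hn⟩
          refine ⟨M, by omega, by omega, ?_, hn⟩
          intro m hm1 hm2
          by_cases hmt : t0 + 1 ≤ m
          · exact hall m hmt hm2
          · have hm : m = t0 := by omega
            rw [hm]; exact hpass
        · rintro ⟨M, h1, h2, hall, hn⟩
          have hMt : M ≠ t0 := by
            intro he
            apply hret
            rw [he] at hn
            rw [hn, Nat.succ_mul, Nat.cast_add]
          exact ⟨M, by omega, by omega, fun m hm1 hm2 => hall m (by omega) hm2, hn⟩
    · rw [if_pos hpass]
      constructor
      · intro h; simp at h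
      · rintro ⟨M, h1, h2, hall, hn⟩
        exact absurd (hall t0 le_rfl h1) hpass

-- shifted-prefix equality (B's single comparison) ↔ every aligned block equals the tile (A's scan)
lemma pv_period_iff_blocks (cs : List Char) (jn nn : Nat) (hj : 1 ≤ jn)
    (_hnL : nn ≤ cs.length) (hdvd : jn ∣ nn) (h2 : 2 * jn ≤ nn) :
    ((cs.drop jn).take (nn - jn) = cs.take (nn - jn))
      ↔ (∀ m : Nat, 1 ≤ m → (m + 1) * jn ≤ nn → cs.take jn = (cs.drop (m * jn)).take jn) := by
  have hpt : ((cs.drop jn).take (nn - jn) = cs.take (nn - jn))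
      ↔ ∀ k : Nat, jn + k < nn → cs[jn + k]? = cs[k]? := by
    constructor
    · intro h k hk
      have h1 := congrArg (fun l => l[k]?) h
      simp only [List.getElem?_take, List.getElem?_drop] at h1
      rw [if_pos (by omega : k < nn - jn), if_pos (by omega : k < nn - jn)] at h1
      exact h1
    · intro h
      apply List.ext_getElem?
      intro k
      simp only [List.getElem?_take, List.getElem?_drop]
      by_cases hk : k < nn - jn
      · rw [if_pos hk, if_pos hk]
        exact h k (by omega)
      · rw [if_neg hk, if_neg hk]
  have hblk : ∀ m : Nat, (cs.take jn = (cs.drop (m * jn)).take jn)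
      ↔ ∀ r : Nat, r < jn → cs[r]? = cs[m * jn + r]? := by
    intro m
    constructor
    · intro h r hr
      have h1 := congrArg (fun l => l[r]?) h
      simp only [List.getElem?_take, List.getElem?_drop] at h1
      rw [if_pos hr, if_pos hr] at h1
      exact h1
    · intro h
      apply List.ext_getElem?
      intro r
      simp only [List.getElem?_take, List.getElem?_drop]
      by_cases hr : r < jn
      · rw [if_pos hr, if_pos hr]
        exact h r hr
      · rw [if_neg hr, if_neg hr]
  rw [hpt]
  constructor
  · -- period → blocks
    intro hPer
    have hstep : ∀ m : Nat, (m + 1) * jn ≤ nn → ∀ r : Nat, r < jn → cs[m * jn + r]? = cs[r]? := by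
      intro m
      induction m with
      | zero => intro _ r hr; simp
      | succ m ihm =>
        intro hle r hr
        have hx : (m + 1 + 1) * jn = m * jn + (jn + jn) := by ring
        rw [hx] at hle
        have h1 : jn + (m * jn + r) < nn := by omega
        have h3 : (m + 1) * jn + r = jn + (m * jn + r) := by ring
        rw [h3, hPer _ h1]
        exact ihm (by omega) r hr
    intro m hm1 hm2
    rw [hblk m]
    intro r hr
    exact (hstep m hm2 r hr).symm
  · -- blocks → period
    intro hB k hk
    obtain ⟨q, r, hr, hk2⟩ : ∃ q r : Nat, r < jn ∧ k = q * jn + r := by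
      refine ⟨k / jn, k % jn, Nat.mod_lt _ (by omega), ?_⟩
      have h := Nat.div_add_mod k jn
      have h2' : k / jn * jn = jn * (k / jn) := Nat.mul_comm _ _
      omega
    obtain ⟨c, hc⟩ := hdvd
    have hq1 : (q + 1) * jn < nn := by
      have : (q + 1) * jn = q * jn + jn := by ring
      omega
    have hq2 : (q + 1 + 1) * jn ≤ nn := by
      rw [hc] at hq1 ⊢
      have hcc : q + 1 < c := by
        have hjn0 : 0 < jn := by omega
        have := (Nat.mul_lt_mul_right hjn0).mp (by rw [Nat.mul_comm jn c] at hq1; exact hq1)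
        exact this
      calc (q + 1 + 1) * jn ≤ c * jn := Nat.mul_le_mul_right jn (by omega)
        _ = jn * c := Nat.mul_comm _ _
    have hA := (hblk (q + 1)).mp (hB (q + 1) (by omega) hq2) r hr
    have e1 : jn + k = (q + 1) * jn + r := by rw [hk2]; ring
    rw [e1, ← hA]
    cases q with
    | zero =>
      rw [hk2]; simp
    | succ q' =>
      have hq'2 : (q' + 1 + 1) * jn ≤ nn := le_of_lt hq1
      have hA' := (hblk (q' + 1)).mp (hB (q' + 1) (by omega) hq'2) r hr
      rw [hk2, ← hA']

-- per-candidate bridge: A's inner loop at j returns `some i` iff B's branch condition (plus the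
-- outer guard 0 < n ≤ len) holds at j
lemma pv_inner_some_iff (cs : List Char) (n i : Int) (jn : Nat) (hj : 1 ≤ jn)
    (hjL : jn ≤ cs.length) :
    (pvInnerA cs (PySem.List.slice cs none (some (jn : Int))) n i
        (PySem.List.pyRange (jn : Int) ((cs.length : Int) + 1) (jn : Int)) = some i)
      ↔ (0 < n ∧ n ≤ (cs.length : Int) ∧ PySem.Int.mod n (jn : Int) = 0 ∧ 2 * (jn : Int) ≤ n ∧
          PySem.List.slice cs (some (jn : Int)) (some n)
            = PySem.List.slice cs none (some (n - (jn : Int)))) := by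
  have hsub : PySem.List.slice cs none (some (jn : Int)) = cs.take jn :=
    PySem.List.slice_to_natCast cs jn
  have hlen : (cs.take jn).length = jn := by
    rw [List.length_take]; omega
  have hrange : PySem.List.pyRange (jn : Int) ((cs.length : Int) + 1) (jn : Int)
      = (List.range (cs.length / jn)).map (fun k => (((1 + k) * jn : Nat) : Int)) := by
    rw [PySem.List.pyRange_of_pos _ _ (by exact_mod_cast hj : (0 : Int) < (jn : Int))]
    rw [if_pos (by exact_mod_cast Nat.lt_succ_of_le hjL : (jn : Int) < (cs.length : Int) + 1)]
    have hcount : ((cs.length : Int) + 1 - (jn : Int) + (jn : Int) - 1) / (jn : Int)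
        = ((cs.length / jn : Nat) : Int) := by
      have e : (cs.length : Int) + 1 - (jn : Int) + (jn : Int) - 1 = (cs.length : Int) := by ring
      rw [e]
      norm_cast
    rw [hcount, Int.toNat_natCast]
    refine List.map_congr_left ?_
    intro k _
    push_cast
    ring
  rw [hsub, hrange, pvInnerA_range_spec cs (cs.take jn) n i jn hlen (cs.length / jn) 1]
  constructor
  · rintro ⟨M, hM1, hM2, hall, hn⟩
    have hpassM := hall M hM1 le_rfl
    have hML : (M + 1) * jn ≤ cs.length := by
      have hlen2 := congrArg List.length hpassM
      simp only [List.length_take, List.length_drop] at hlen2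
      have e : (M + 1) * jn = M * jn + jn := by ring
      omega
    have hn0 : (0 : Int) < n := by
      rw [hn]; exact_mod_cast Nat.mul_pos (by omega) (by omega)
    refine ⟨hn0, by rw [hn]; exact_mod_cast hML, ?_, ?_, ?_⟩
    · rw [hn, PySem.Int.mod_eq_zero_iff_dvd]
      exact_mod_cast dvd_mul_left jn (M + 1)
    · rw [hn]
      have : 2 * jn ≤ (M + 1) * jn := Nat.mul_le_mul_right jn (by omega)
      exact_mod_cast this
    · rw [hn]
      have hsub2 : ((((M + 1) * jn : Nat)) : Int) - (jn : Int) = (((M + 1) * jn - jn : Nat) : Int) :=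
        (Nat.cast_sub (Nat.le_mul_of_pos_left jn (by omega))).symm
      rw [hsub2, PySem.List.slice_natCast, PySem.List.slice_to_natCast]
      apply (pv_period_iff_blocks cs jn ((M + 1) * jn) hj hML ⟨M + 1, Nat.mul_comm _ _⟩
        (Nat.mul_le_mul_right jn (by omega))).mpr
      intro m hm1 hm2
      have hmM : m ≤ M := by
        have := Nat.le_of_mul_le_mul_right hm2 (by omega : 0 < jn)
        omega
      exact hall m hm1 hmM
  · rintro ⟨hn0, hnL, hmod, h2, hslice⟩
    have hnn : n = ((n.toNat : Nat) : Int) := (Int.toNat_of_nonneg hn0.le).symm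
    set nn := n.toNat with hnndef
    have hdvd : jn ∣ nn := by
      rw [PySem.Int.mod_eq_zero_iff_dvd] at hmod
      rw [hnn] at hmod
      exact_mod_cast hmod
    have h2' : 2 * jn ≤ nn := by rw [hnn] at h2; exact_mod_cast h2
    have hnL' : nn ≤ cs.length := by rw [hnn] at hnL; exact_mod_cast hnL
    obtain ⟨c, hc⟩ := hdvd
    have hc2 : 2 ≤ c := by
      have : 2 * jn ≤ jn * c := by omega
      by_contra hcc
      interval_cases c <;> omega
    have hperiod : (cs.drop jn).take (nn - jn) = cs.take (nn - jn) := by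
      have hsub2 : ((nn : Nat) : Int) - (jn : Int) = ((nn - jn : Nat) : Int) :=
        (Nat.cast_sub (by omega)).symm
      rw [hnn, hsub2, PySem.List.slice_natCast, PySem.List.slice_to_natCast] at hslice
      exact hslice
    have hblocks := (pv_period_iff_blocks cs jn nn hj hnL' ⟨c, hc⟩ h2').mp hperiod
    refine ⟨c - 1, by omega, ?_, ?_, ?_⟩
    · have hcdiv : c ≤ cs.length / jn := by
        have : nn / jn ≤ cs.length / jn := Nat.div_le_div_right hnL'
        have hceq : nn / jn = c := by rw [hc]; exact Nat.mul_div_cancel_left c (by omega)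
        omega
      omega
    · intro m hm1 hm2
      refine hblocks m hm1 ?_
      have : m + 1 ≤ c := by omega
      calc (m + 1) * jn ≤ c * jn := Nat.mul_le_mul_right jn this
        _ = jn * c := Nat.mul_comm _ _
        _ = nn := hc.symm
    · rw [hnn]
      congr 1
      rw [hc]
      have : c - 1 + 1 = c := by omega
      rw [this, Nat.mul_comm]

lemma pv_outer_eq (cs : List Char) (n i : Int) :
    ∀ js : List Int, (∀ j ∈ js, 1 ≤ j) →
      pvOuterA cs n i js = if 0 < n ∧ n ≤ (cs.length : Int) then pvLoopB cs n i js else 0 := by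
  intro js
  induction js with
  | nil => intro _; simp [pvOuterA, pvLoopB]
  | cons j js ih =>
    intro hall
    have hj1 : 1 ≤ j := hall j (by simp)
    have hall' : ∀ x ∈ js, 1 ≤ x := fun x hx => hall x (by simp [hx])
    obtain ⟨jn, rfl⟩ : ∃ jn : Nat, j = (jn : Int) := ⟨j.toNat, (Int.toNat_of_nonneg (by omega)).symm⟩
    have hjn : 1 ≤ jn := by exact_mod_cast hj1
    by_cases hjL : jn ≤ cs.length
    · simp only [pvOuterA, pvLoopB]
      by_cases hcond : PySem.Int.mod n (jn : Int) = 0 ∧ 2 * (jn : Int) ≤ n ∧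
          PySem.List.slice cs (some (jn : Int)) (some n)
            = PySem.List.slice cs none (some (n - (jn : Int)))
      · by_cases hg : 0 < n ∧ n ≤ (cs.length : Int)
        · have hsome := (pv_inner_some_iff cs n i jn hjn hjL).mpr ⟨hg.1, hg.2, hcond.1, hcond.2.1, hcond.2.2⟩
          rw [hsome, if_pos hg, if_pos hcond]
        · have hnone : pvInnerA cs (PySem.List.slice cs none (some (jn : Int))) n i
              (PySem.List.pyRange (jn : Int) ((cs.length : Int) + 1) (jn : Int)) = none := by
            rcases pvInnerA_none_or cs (PySem.List.slice cs none (some (jn : Int))) n i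
                (PySem.List.pyRange (jn : Int) ((cs.length : Int) + 1) (jn : Int)) with h | h
            · exact h
            · exfalso
              obtain ⟨h1, h2, -⟩ := (pv_inner_some_iff cs n i jn hjn hjL).mp h
              exact hg ⟨h1, h2⟩
          rw [hnone, ih hall', if_neg hg, if_neg hg]
      · have hnone : pvInnerA cs (PySem.List.slice cs none (some (jn : Int))) n i
            (PySem.List.pyRange (jn : Int) ((cs.length : Int) + 1) (jn : Int)) = none := by
          rcases pvInnerA_none_or cs (PySem.List.slice cs none (some (jn : Int))) n i
              (PySem.List.pyRange (jn : Int) ((cs.length : Int) + 1) (jn : Int)) with h | h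
          · exact h
          · exfalso
            obtain ⟨-, -, h3, h4, h5⟩ := (pv_inner_some_iff cs n i jn hjn hjL).mp h
            exact hcond ⟨h3, h4, h5⟩
        rw [hnone, ih hall']
        by_cases hg : 0 < n ∧ n ≤ (cs.length : Int)
        · rw [if_pos hg, if_pos hg, if_neg hcond]
        · rw [if_neg hg, if_neg hg]
    · have hrange : PySem.List.pyRange (jn : Int) ((cs.length : Int) + 1) (jn : Int) = [] := by
        rw [PySem.List.pyRange_of_pos _ _ (by exact_mod_cast hjn : (0 : Int) < (jn : Int))]
        rw [if_neg (by omega : ¬ ((jn : Int) < (cs.length : Int) + 1))]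
        simp
      simp only [pvOuterA, pvLoopB, hrange]
      show pvOuterA cs n i js = _
      rw [ih hall']
      by_cases hg : 0 < n ∧ n ≤ (cs.length : Int)
      · rw [if_pos hg, if_pos hg, if_neg ?_]
        rintro ⟨-, h2c, -⟩
        have hgn := hg.2
        omega
      · rw [if_neg hg, if_neg hg]

-- ===== VERDICT (by name: the statement is the Claim_ definition above) =====
theorem check_substr_spec : Claim_equal_check_substr := by
  intro stringified num_len i stop _
  unfold Spec_check_substr check_substr check_substr_alt
  exact pv_outer_eq stringified.toList num_len i (PySem.List.pyRange 1 (stop + 1) 1)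
    (fun j hj => (PySem.List.mem_pyRange_one.mp hj).1)
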